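-- pv_equiv track=rewrite | github.com/Thejesh1698/insight | Arcane/src/llm_finetuning/ResponseCleanerService.py | fix_validity_duration
-- ===== SOURCE A (Python) =====
-- def fix_validity_duration(val):  # If a value is 90 or 365 then set it as 30. less than -1 is -1
--     val = int(val)
--     valid_days = [-1, 1, 3, 7, 14, 30]
--     if val in valid_days:
--         return val
--     else:
--         valid_value = -1
--         for i in valid_days:
--             if val > i:
--                 valid_value = i
--         return valid_value
-- ===== SOURCE B (Python) =====
-- import bisect
--
-- def fix_validity_duration(val):
--     val = int(val)
--     valid_days = [-1, 1, 3, 7, 14, 30]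
--     idx = bisect.bisect_right(valid_days, val) - 1
--     return valid_days[idx] if idx >= 0 else -1
-- ===== Notes on version B (the rewrite author's own statement) =====
-- stated objective: idiomatic
-- what changed: Replaces the membership pre-check plus linear forward scan with a single bisect_right binary search that finds the floor element of the sorted valid_days list directly.
import Mathlib
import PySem

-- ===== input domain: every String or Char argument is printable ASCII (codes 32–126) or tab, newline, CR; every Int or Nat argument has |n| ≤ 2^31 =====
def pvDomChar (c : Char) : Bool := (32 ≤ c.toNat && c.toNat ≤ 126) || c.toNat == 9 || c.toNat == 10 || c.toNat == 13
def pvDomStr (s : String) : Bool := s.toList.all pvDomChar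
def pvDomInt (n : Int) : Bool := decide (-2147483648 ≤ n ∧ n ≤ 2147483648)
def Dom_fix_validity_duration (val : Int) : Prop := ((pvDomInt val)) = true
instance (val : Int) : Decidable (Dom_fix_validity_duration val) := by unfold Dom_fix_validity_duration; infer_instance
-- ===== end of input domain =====

-- B replaces the membership pre-check and linear scan with a bisect_right binary search for the floor element (idiomatic).

-- ===== PORT A =====
def fix_validity_duration (val : Int) : Int :=
  let valid_days : List Int := [-1, 1, 3, 7, 14, 30]
  if valid_days.contains val then
    val
  else
    valid_days.foldl (fun valid_value i => if val > i then i else valid_value) (-1)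

-- ===== PORT B =====
-- bisect.bisect_right ported as the standard lo/hi binary-search loop (fuel = list length bounds the iterations)
def bisectRightGo (xs : List Int) (x : Int) : Nat → Nat → Nat → Nat
  | 0, lo, _ => lo
  | fuel + 1, lo, hi =>
    if lo < hi then
      let mid := (lo + hi) / 2
      if x < xs.getD mid 0 then bisectRightGo xs x fuel lo mid
      else bisectRightGo xs x fuel (mid + 1) hi
    else lo

def bisectRight (xs : List Int) (x : Int) : Nat :=
  bisectRightGo xs x xs.length 0 xs.length

def fix_validity_duration_alt (val : Int) : Int :=
  let valid_days : List Int := [-1, 1, 3, 7, 14, 30]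
  let idx : Int := (bisectRight valid_days val : Int) - 1
  if idx ≥ 0 then valid_days.getD idx.toNat (-1) else -1

-- ===== PRECONDITION & SPEC =====
def Spec_fix_validity_duration (val : Int) (out : Int) : Prop := out = fix_validity_duration_alt val
instance (val : Int) (out : Int) : Decidable (Spec_fix_validity_duration val out) := by unfold Spec_fix_validity_duration; infer_instance

-- ===== CLAIM (what is proved, stated in full; the proofs are below) =====
def Claim_equal_fix_validity_duration : Prop := ∀ (val : Int), Dom_fix_validity_duration val → Spec_fix_validity_duration val (fix_validity_duration val)

-- ===== LEMMAS AND PROOFS =====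

-- ===== VERDICT (by name: the statement is the Claim_ definition above) =====
lemma key (val : Int) : fix_validity_duration val = fix_validity_duration_alt val := by
  by_cases e1 : val = -1; · subst e1; decide
  by_cases e2 : val = 1; · subst e2; decide
  by_cases e3 : val = 3; · subst e3; decide
  by_cases e4 : val = 7; · subst e4; decide
  by_cases e5 : val = 14; · subst e5; decide
  by_cases e6 : val = 30; · subst e6; decide
  have h1 : (val == -1) = false := by simpa using e1
  have h2 : (val == 1) = false := by simpa using e2
  have h3 : (val == 3) = false := by simpa using e3
  have h4 : (val == 7) = false := by simpa using e4
  have h5 : (val == 14) = false := by simpa using e5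
  have h6 : (val == 30) = false := by simpa using e6
  unfold fix_validity_duration fix_validity_duration_alt bisectRight
  simp only [bisectRightGo, List.length, List.contains, List.foldl, List.elem,
    h1, h2, h3, h4, h5, h6]
  norm_num
  split_ifs <;> first | omega | decide | (simp; omega)

theorem fix_validity_duration_spec : Claim_equal_fix_validity_duration := by
  intro val _
  exact key val
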